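-- pv_equiv track=rewrite | github.com/wendlerc/latent2latent | lat2lat/nn/resnet.py | find_nearest_landscape
-- ===== SOURCE A (Python) =====
-- def find_nearest_landscape(h, w):
--     # Assuming h,w are 1:1, find nearest landscape 9:16
--     # Only use common 9:16 resolutions
--     area = h * w
--
--     # Define common 9:16 resolutions
--     resolutions = [
--         (360, 640),
--         (720, 1280),
--         (1080, 1920)
--     ]
--
--     # Find closest resolution by area
--     min_diff = float('inf')
--     h_new, w_new = resolutions[0]
--
--     for res_h, res_w in resolutions:
--         res_area = res_h * res_w
--         diff = abs(area - res_area)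
--         if diff < min_diff:
--             min_diff = diff
--             h_new, w_new = res_h, res_w
--
--     return h_new, w_new
-- ===== SOURCE B (Python) =====
-- def find_nearest_landscape(h, w):
--     # Closed-form: branch on the midpoints between the three candidate areas
--     # (230400, 921600, 2073600); <= keeps A's first-wins tie-break.
--     area = h * w
--     if area <= 576000:
--         return (360, 640)
--     elif area <= 1497600:
--         return (720, 1280)
--     else:
--         return (1080, 1920)
-- ===== Notes on version B (the rewrite author's own statement) =====
-- stated objective: simpler
-- what changed: Replaces the scan over the resolution list tracking a running minimum difference with a closed-form two-threshold branch on the area, using the midpoints between consecutive candidate areas (<= reproduces A's first-wins tie-break).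
import Mathlib
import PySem

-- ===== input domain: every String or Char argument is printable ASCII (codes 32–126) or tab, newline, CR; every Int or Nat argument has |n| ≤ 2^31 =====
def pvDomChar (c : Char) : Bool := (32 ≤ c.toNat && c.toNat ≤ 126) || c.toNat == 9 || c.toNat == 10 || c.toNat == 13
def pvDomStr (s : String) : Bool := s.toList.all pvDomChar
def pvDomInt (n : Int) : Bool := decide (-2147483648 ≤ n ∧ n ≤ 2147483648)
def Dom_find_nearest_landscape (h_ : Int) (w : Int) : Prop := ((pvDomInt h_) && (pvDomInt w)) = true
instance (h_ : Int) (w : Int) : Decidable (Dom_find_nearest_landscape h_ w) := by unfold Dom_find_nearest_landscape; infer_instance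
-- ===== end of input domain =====

-- ===== PORT A =====
-- B replaces A's running-minimum scan with a closed-form threshold branch on the area; same value on all inputs (objective: simpler).
def pvResolutions : List (Int × Int) := [(360, 640), (720, 1280), (1080, 1920)]

-- the loop body of A; min_diff = float('inf') is modelled as Option Int (none = infinity, and diff < inf is always true)
def pvStep (area : Int) (st : Option Int × (Int × Int)) (res : Int × Int) : Option Int × (Int × Int) :=
  let res_area := res.1 * res.2
  let diff := ((area - res_area).natAbs : Int)  -- Python abs on ints
  match st.1 with
  | none => (some diff, res)
  | some m => if diff < m then (some diff, res) else st

def find_nearest_landscape (h_ : Int) (w : Int) : Int × Int :=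
  let area := h_ * w
  (pvResolutions.foldl (pvStep area) (none, (360, 640))).2

-- ===== PORT B =====
def find_nearest_landscape_alt (h_ : Int) (w : Int) : Int × Int :=
  let area := h_ * w
  if area ≤ 576000 then (360, 640)
  else if area ≤ 1497600 then (720, 1280)
  else (1080, 1920)

-- ===== PRECONDITION & SPEC =====
def Spec_find_nearest_landscape (h_ : Int) (w : Int) (out : Int × Int) : Prop := out = find_nearest_landscape_alt h_ w
instance (h_ : Int) (w : Int) (out : Int × Int) : Decidable (Spec_find_nearest_landscape h_ w out) := by unfold Spec_find_nearest_landscape; infer_instance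

-- ===== CLAIM (what is proved, stated in full; the proofs are below) =====
def Claim_equal_find_nearest_landscape : Prop := ∀ (h_ : Int) (w : Int), Dom_find_nearest_landscape h_ w → Spec_find_nearest_landscape h_ w (find_nearest_landscape h_ w)

-- ===== LEMMAS AND PROOFS =====
theorem pvStep1 (a : Int) (r0 : Int × Int) :
    pvStep a (none, r0) (360, 640) = (some ((a - 230400).natAbs : Int), (360, 640)) := by
  norm_num [pvStep]

theorem pvStep2 (a m : Int) (r0 : Int × Int) :
    pvStep a (some m, r0) (720, 1280) =
      if ((a - 921600).natAbs : Int) < m then (some ((a - 921600).natAbs : Int), (720, 1280))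
      else (some m, r0) := by
  norm_num [pvStep]

theorem pvStep3 (a m : Int) (r0 : Int × Int) :
    pvStep a (some m, r0) (1080, 1920) =
      if ((a - 2073600).natAbs : Int) < m then (some ((a - 2073600).natAbs : Int), (1080, 1920))
      else (some m, r0) := by
  norm_num [pvStep]

theorem pv_eq (h_ w : Int) : find_nearest_landscape h_ w = find_nearest_landscape_alt h_ w := by
  unfold find_nearest_landscape find_nearest_landscape_alt pvResolutions
  generalize h_ * w = a
  show (List.foldl (pvStep a) (none, (360, 640)) [(360, 640), (720, 1280), (1080, 1920)]).2 =
    if a ≤ 576000 then ((360 : Int), (640 : Int)) else if a ≤ 1497600 then (720, 1280) else (1080, 1920)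
  rw [List.foldl_cons, List.foldl_cons, List.foldl_cons, List.foldl_nil, pvStep1, pvStep2]
  by_cases h1 : ((a - 921600).natAbs : Int) < ((a - 230400).natAbs : Int)
  · rw [if_pos h1, pvStep3]
    by_cases h2 : ((a - 2073600).natAbs : Int) < ((a - 921600).natAbs : Int)
    · rw [if_pos h2, if_neg (by omega), if_neg (by omega)]
    · rw [if_neg h2, if_neg (by omega), if_pos (by omega)]
  · rw [if_neg h1, pvStep3]
    by_cases h2 : ((a - 2073600).natAbs : Int) < ((a - 230400).natAbs : Int)
    · rw [if_pos h2, if_neg (by omega), if_neg (by omega)]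
    · rw [if_neg h2, if_pos (by omega)]

-- ===== VERDICT (by name: the statement is the Claim_ definition above) =====
theorem find_nearest_landscape_spec : Claim_equal_find_nearest_landscape := by
  intro h_ w _
  exact pv_eq h_ w
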